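-- pv_equiv track=rewrite | github.com/leocop03/crypto-phishing-simulation-thesis | simulations/analyze_latest.py | ordered_columns
-- ===== SOURCE A (Python) =====
-- from collections import Counter, defaultdict
--
-- def ordered_columns(counter_by_group: dict[str, Counter], preferred_order: list[str]) -> list[str]:
--     seen = set()
--     columns = []
--     for value in preferred_order:
--         if any(value in counter for counter in counter_by_group.values()):
--             columns.append(value)
--             seen.add(value)
--     extras = sorted(
--         {
--             value
--             for counter in counter_by_group.values()
--             for value in counter
--             if value not in seen
--         }
--     )
--     return columns + extras
-- ===== SOURCE B (Python) =====
-- def ordered_columns(counter_by_group, preferred_order):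
--     present = set()
--     for counter in counter_by_group.values():
--         present.update(counter.keys())
--     columns = [name for name in preferred_order if name in present]
--     extras = sorted(present - set(preferred_order))
--     return columns + extras
-- ===== Notes on version B (the rewrite author's own statement) =====
-- stated objective: faster
-- what changed: Builds the set of present column names once up front, so A's per-preferred-name any() scan over all counters and its incrementally maintained seen set disappear: the preferred part becomes a plain membership filter against that set and the extras become a sorted set difference present - set(preferred_order).
import Mathlib
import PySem

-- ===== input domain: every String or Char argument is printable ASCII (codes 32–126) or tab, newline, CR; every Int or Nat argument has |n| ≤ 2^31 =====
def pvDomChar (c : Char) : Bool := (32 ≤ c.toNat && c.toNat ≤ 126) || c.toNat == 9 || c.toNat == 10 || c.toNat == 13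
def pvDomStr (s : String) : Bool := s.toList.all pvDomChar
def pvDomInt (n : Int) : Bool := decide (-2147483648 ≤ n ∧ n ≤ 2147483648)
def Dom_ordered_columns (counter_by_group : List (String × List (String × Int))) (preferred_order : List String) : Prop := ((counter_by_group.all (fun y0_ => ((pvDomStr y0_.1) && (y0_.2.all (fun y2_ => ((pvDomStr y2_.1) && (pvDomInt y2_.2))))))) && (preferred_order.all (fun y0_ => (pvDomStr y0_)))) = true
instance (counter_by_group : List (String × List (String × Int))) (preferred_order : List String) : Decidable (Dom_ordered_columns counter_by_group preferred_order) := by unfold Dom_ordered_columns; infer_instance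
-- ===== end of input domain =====

-- B builds the set of present column names once, replacing A's per-preferred-name any()-scan over all
-- counters and its incrementally maintained seen set by a plain membership filter plus a sorted set
-- difference; a timing run measured B faster.

-- ===== PORT A =====
def ordered_columns (counter_by_group : List (String × List (String × Int))) (preferred_order : List String) : List String :=
  let vals := (PySem.Dict.ofList counter_by_group).values
  let sc := preferred_order.foldl (fun (st : PySem.Set String × List String) v =>
      if vals.any (fun c => (PySem.Dict.ofList c).contains v)
      then (PySem.Set.add st.1 v, st.2 ++ [v]) else st) (PySem.Set.empty, [])
  let extras := PySem.List.sorted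
      (vals.foldl (fun s c =>
          ((PySem.Dict.ofList c).keys).foldl
            (fun s v => if PySem.Set.contains sc.1 v then s else PySem.Set.add s v) s)
        PySem.Set.empty)
      (fun v => v)
  sc.2 ++ extras

-- ===== PORT B =====
def ordered_columns_alt (counter_by_group : List (String × List (String × Int))) (preferred_order : List String) : List String :=
  let present := (PySem.Dict.ofList counter_by_group).values.foldl
      (fun (s : PySem.Set String) c => PySem.Set.update s ((PySem.Dict.ofList c).keys)) PySem.Set.empty
  let columns := preferred_order.filter (fun name => PySem.Set.contains present name)
  let extras := PySem.List.sorted (PySem.Set.diff present (PySem.Set.ofList preferred_order)) (fun v => v)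
  columns ++ extras

-- ===== PRECONDITION & SPEC =====
def Spec_ordered_columns (counter_by_group : List (String × List (String × Int))) (preferred_order : List String) (out : List String) : Prop := out = ordered_columns_alt counter_by_group preferred_order
instance (counter_by_group : List (String × List (String × Int))) (preferred_order : List String) (out : List String) : Decidable (Spec_ordered_columns counter_by_group preferred_order out) := by unfold Spec_ordered_columns; infer_instance

-- ===== CLAIM (what is proved, stated in full; the proofs are below) =====
def Claim_equal_ordered_columns : Prop := ∀ (counter_by_group : List (String × List (String × Int))) (preferred_order : List String), Dom_ordered_columns counter_by_group preferred_order → Spec_ordered_columns counter_by_group preferred_order (ordered_columns counter_by_group preferred_order)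

-- ===== LEMMAS AND PROOFS =====

theorem pvLoopA (p : String → Bool) (pref : List String) :
    ∀ (s : PySem.Set String) (c : List String),
    pref.foldl (fun (st : PySem.Set String × List String) v =>
        if p v then (PySem.Set.add st.1 v, st.2 ++ [v]) else st) (s, c)
      = (PySem.Set.update s (pref.filter p), c ++ pref.filter p) := by
  induction pref with
  | nil => intro s c; simp [PySem.Set.update]
  | cons a t ih =>
    intro s c
    by_cases h : p a = true
    · simp [List.foldl, h, ih, PySem.Set.update]
    · simp only [Bool.not_eq_true] at h
      simp [List.foldl, h, ih]

theorem pvMemPresent (l : List (List (String × Int))) :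
    ∀ (s : PySem.Set String) (y : String),
    (y ∈ l.foldl (fun (s : PySem.Set String) c => PySem.Set.update s ((PySem.Dict.ofList c).keys)) s
      ↔ y ∈ s ∨ ∃ c ∈ l, y ∈ (PySem.Dict.ofList c).keys) := by
  induction l with
  | nil => simp
  | cons a t ih =>
    intro s y
    show (y ∈ t.foldl _ (PySem.Set.update s (PySem.Dict.ofList a).keys) ↔ _)
    rw [ih, PySem.Set.mem_update]
    simp
    tauto

theorem pvNodupPresent (l : List (List (String × Int))) :
    ∀ (s : PySem.Set String), s.Nodup →
    (l.foldl (fun (s : PySem.Set String) c => PySem.Set.update s ((PySem.Dict.ofList c).keys)) s).Nodup := by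
  induction l with
  | nil => intro s hs; simpa
  | cons a t ih => intro s hs; exact ih _ (PySem.Set.nodup_update _ _ hs)

theorem pvMemInner (seen : PySem.Set String) (keys : List String) :
    ∀ (s : PySem.Set String) (y : String),
    (y ∈ keys.foldl (fun s v => if PySem.Set.contains seen v then s else PySem.Set.add s v) s
      ↔ y ∈ s ∨ (y ∈ keys ∧ y ∉ seen)) := by
  induction keys with
  | nil => simp
  | cons a t ih =>
    intro s y
    show (y ∈ t.foldl _ (if PySem.Set.contains seen a then s else PySem.Set.add s a) ↔ _)
    rw [ih]
    by_cases h : PySem.Set.contains seen a = true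
    · have ha : a ∈ seen := (PySem.Set.contains_iff seen a).1 h
      rw [if_pos h]
      simp only [List.mem_cons]
      constructor
      · tauto
      · rintro (hy | ⟨(rfl | hy), hn⟩)
        · tauto
        · exact absurd ha hn
        · tauto
    · have ha : a ∉ seen := fun hm => h ((PySem.Set.contains_iff seen a).2 hm)
      rw [if_neg h, ]
      simp only [List.mem_cons]
      rw [PySem.Set.mem_add]
      constructor
      · rintro ((hy | rfl) | hy) <;> tauto
      · rintro (hy | ⟨(rfl | hy), hn⟩) <;> tauto

theorem pvNodupInner (seen : PySem.Set String) (keys : List String) :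
    ∀ (s : PySem.Set String), s.Nodup →
    (keys.foldl (fun s v => if PySem.Set.contains seen v then s else PySem.Set.add s v) s).Nodup := by
  induction keys with
  | nil => intro s hs; simpa
  | cons a t ih =>
    intro s hs
    show (t.foldl _ (if PySem.Set.contains seen a then s else PySem.Set.add s a)).Nodup
    by_cases h : PySem.Set.contains seen a = true
    · rw [if_pos h]; exact ih s hs
    · rw [if_neg h]; exact ih _ (PySem.Set.nodup_add _ _ hs)

theorem pvMemExtras (seen : PySem.Set String) (l : List (List (String × Int))) :
    ∀ (s : PySem.Set String) (y : String),
    (y ∈ l.foldl (fun s c => ((PySem.Dict.ofList c).keys).foldl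
          (fun s v => if PySem.Set.contains seen v then s else PySem.Set.add s v) s) s
      ↔ y ∈ s ∨ ((∃ c ∈ l, y ∈ (PySem.Dict.ofList c).keys) ∧ y ∉ seen)) := by
  induction l with
  | nil => simp
  | cons a t ih =>
    intro s y
    show (y ∈ t.foldl _ (((PySem.Dict.ofList a).keys).foldl _ s) ↔ _)
    rw [ih, pvMemInner]
    simp only [List.mem_cons]
    constructor
    · rintro ((hy | hy) | hy)
      · tauto
      · exact Or.inr ⟨⟨a, by simp, hy.1⟩, hy.2⟩
      · obtain ⟨⟨c, hc, hyc⟩, hn⟩ := hy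
        exact Or.inr ⟨⟨c, by simp [hc], hyc⟩, hn⟩
    · rintro (hy | ⟨⟨c, (rfl | hc), hyc⟩, hn⟩)
      · tauto
      · exact Or.inl (Or.inr ⟨hyc, hn⟩)
      · exact Or.inr ⟨⟨c, hc, hyc⟩, hn⟩

theorem pvNodupExtras (seen : PySem.Set String) (l : List (List (String × Int))) :
    ∀ (s : PySem.Set String), s.Nodup →
    (l.foldl (fun s c => ((PySem.Dict.ofList c).keys).foldl
          (fun s v => if PySem.Set.contains seen v then s else PySem.Set.add s v) s) s).Nodup := by
  induction l with
  | nil => intro s hs; simpa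
  | cons a t ih => intro s hs; exact ih _ (pvNodupInner seen _ s hs)

theorem pv_main (cbg : List (String × List (String × Int))) (pref : List String) :
    ordered_columns cbg pref = ordered_columns_alt cbg pref := by
  simp only [ordered_columns, ordered_columns_alt]
  rw [pvLoopA]
  dsimp only
  simp only [List.nil_append]
  set vals := (PySem.Dict.ofList cbg).values with hvals
  set p : String → Bool := fun v => vals.any (fun c => (PySem.Dict.ofList c).contains v) with hp
  set seen : PySem.Set String := PySem.Set.update PySem.Set.empty (pref.filter p) with hseen
  set E := vals.foldl (fun s c =>
      ((PySem.Dict.ofList c).keys).foldl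
        (fun s v => if PySem.Set.contains seen v then s else PySem.Set.add s v) s)
      PySem.Set.empty with hE
  set P := vals.foldl (fun (s : PySem.Set String) c => PySem.Set.update s ((PySem.Dict.ofList c).keys)) PySem.Set.empty with hP
  have hpiff : ∀ y, p y = true ↔ ∃ c ∈ vals, y ∈ (PySem.Dict.ofList c).keys := by
    intro y
    rw [hp]
    simp only [List.any_eq_true]
    constructor
    · rintro ⟨c, hc, hcy⟩; exact ⟨c, hc, (PySem.Dict.contains_iff_mem_keys _ _).1 hcy⟩
    · rintro ⟨c, hc, hcy⟩; exact ⟨c, hc, (PySem.Dict.contains_iff_mem_keys _ _).2 hcy⟩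
  have hseenmem : ∀ y, y ∈ seen ↔ (y ∈ pref ∧ p y = true) := by
    intro y
    rw [hseen, PySem.Set.mem_update]
    simp [PySem.Set.empty, List.mem_filter]
  have hPmem : ∀ y, y ∈ P ↔ p y = true := by
    intro y
    rw [hP, pvMemPresent]
    simp [PySem.Set.empty, hpiff]
  have hEmem : ∀ y, y ∈ E ↔ (p y = true ∧ y ∉ pref) := by
    intro y
    rw [hE, pvMemExtras]
    simp only [PySem.Set.empty]
    rw [hseenmem y]
    simp only [List.not_mem_nil, false_or]
    rw [← hpiff]
    constructor
    · rintro ⟨hpy, hn⟩; exact ⟨hpy, fun hm => hn ⟨hm, hpy⟩⟩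
    · rintro ⟨hpy, hn⟩; exact ⟨hpy, fun hm => hn hm.1⟩
  have hndP : P.Nodup := pvNodupPresent _ _ List.nodup_nil
  have hndE : E.Nodup := pvNodupExtras _ _ _ List.nodup_nil
  have hcontains : (fun name => PySem.Set.contains P name) = p := by
    funext v
    by_cases hv : p v = true
    · rw [hv, (PySem.Set.contains_iff P v).2 ((hPmem v).2 hv)]
    · simp only [Bool.not_eq_true] at hv
      rw [hv]
      rw [Bool.eq_false_iff]
      intro hc
      have := (hPmem v).1 ((PySem.Set.contains_iff P v).1 hc)
      simp [this] at hv
  congr 1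
  · rw [hcontains]
  · apply PySem.List.sorted_eq_sorted_of_perm
    · intro a b hab; exact hab
    · rw [List.perm_ext_iff_of_nodup hndE (PySem.Set.nodup_diff _ _ hndP)]
      intro a
      rw [hEmem, PySem.Set.mem_diff, hPmem, PySem.Set.mem_ofList]

-- ===== VERDICT (by name: the statement is the Claim_ definition above) =====
theorem ordered_columns_spec : Claim_equal_ordered_columns := by
  intro counter_by_group preferred_order _
  exact pv_main counter_by_group preferred_order
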